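-- pv_equiv track=rewrite | github.com/jscattergood/review-crew | src/conversation/manager.py | _create_anchor_link
-- ===== SOURCE A (Python) =====
-- def _create_anchor_link(agent_name: str) -> str:
--     """Create a markdown anchor link from an agent name.
--
--     Args:
--         agent_name: The agent name to convert to an anchor
--
--     Returns:
--         A markdown-compatible anchor link
--     """
--     # Convert to lowercase and replace spaces and special characters with hyphens
--     anchor = agent_name.lower()
--     anchor = anchor.replace(" ", "-")
--     anchor = anchor.replace("(", "")
--     anchor = anchor.replace(")", "")
--     anchor = anchor.replace("&", "")
--     anchor = anchor.replace(",", "")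
--     anchor = anchor.replace(".", "")
--     anchor = anchor.replace("'", "")
--     anchor = anchor.replace('"', "")
--     # Remove multiple consecutive hyphens
--     while "--" in anchor:
--         anchor = anchor.replace("--", "-")
--     # Remove leading/trailing hyphens
--     anchor = anchor.strip("-")
--     return anchor
-- ===== SOURCE B (Python) =====
-- def _create_anchor_link(agent_name: str) -> str:
--     """Create a markdown anchor link from an agent name (single-pass version)."""
--     out = []
--     for c in agent_name.lower():
--         if c in "()&,.'\"":
--             continue
--         if c == ' ' or c == '-':
--             if out and out[-1] == '-':
--                 continue
--             out.append('-')
--         else: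
--             out.append(c)
--     return ''.join(out).strip('-')
-- ===== Notes on version B (the rewrite author's own statement) =====
-- stated objective: simpler
-- what changed: Replaced A's eight full-string replace passes plus an iterated while-loop that collapses repeated hyphens by a single left-to-right pass that skips removed characters and emits a hyphen only when the last emitted character is not already a hyphen, followed by one final hyphen strip.
import Mathlib
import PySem

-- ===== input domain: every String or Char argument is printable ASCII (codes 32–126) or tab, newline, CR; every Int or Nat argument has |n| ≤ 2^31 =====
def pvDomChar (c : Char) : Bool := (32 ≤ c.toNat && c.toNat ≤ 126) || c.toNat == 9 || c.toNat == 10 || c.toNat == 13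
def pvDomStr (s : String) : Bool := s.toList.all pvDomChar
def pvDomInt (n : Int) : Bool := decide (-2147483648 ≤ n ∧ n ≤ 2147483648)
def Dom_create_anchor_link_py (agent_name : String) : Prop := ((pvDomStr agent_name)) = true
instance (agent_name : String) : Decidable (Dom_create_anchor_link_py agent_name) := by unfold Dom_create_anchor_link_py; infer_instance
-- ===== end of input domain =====

-- B replaces A's eight .replace passes, while-collapse loop and final strip by ONE left-to-right
-- pass that skips removed chars and emits a hyphen only when the last emitted char is not
-- already a hyphen (simpler decomposition; same result).

-- ===== PORT A =====
-- One greedy left-to-right pass of s.replace("--", "-").  It and the three lemmas below are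
-- needed only to prove termination of A's `while "--" in anchor` loop (each pass strictly
-- shortens the string while "--" occurs); the port pvWhileCollapse cites pvRepl2_len_lt.
def pvRepl2 : List Char → List Char
  | [] => []
  | [c] => [c]
  | a :: b :: t => if a = '-' ∧ b = '-' then '-' :: pvRepl2 t else a :: pvRepl2 (b :: t)

theorem pvGoPair_eq (fuel : Nat) : ∀ (l acc : List Char), l.length ≤ fuel →
    PySem.Chars.replace.go ['-', '-'] ['-'] fuel l acc = acc.reverse ++ pvRepl2 l := by
  induction fuel with
  | zero =>
    intro l acc h
    have : l = [] := List.eq_nil_of_length_eq_zero (Nat.le_zero.mp h)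
    subst this
    simp [PySem.Chars.replace.go, pvRepl2]
  | succ n ih =>
    intro l acc h
    match l with
    | [] => simp [PySem.Chars.replace.go, pvRepl2]
    | [c] =>
      simp [PySem.Chars.replace.go, List.isPrefixOf, pvRepl2]
      rw [ih [] (c :: acc) (by simp)]
      simp [pvRepl2]
    | a :: b :: t =>
      simp only [List.length_cons] at h
      simp [PySem.Chars.replace.go, List.isPrefixOf, pvRepl2]
      by_cases hab : a = '-' ∧ b = '-'
      · rw [if_pos ⟨hab.1.symm, hab.2.symm⟩, if_pos hab,
          ih t ('-' :: acc) (by omega)]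
        simp
      · rw [if_neg (fun hx => hab ⟨hx.1.symm, hx.2.symm⟩), if_neg hab,
          ih (b :: t) (a :: acc) (by simp; omega)]
        simp

theorem pvReplacePair_eq (s : List Char) :
    PySem.Chars.replace s ['-', '-'] ['-'] = pvRepl2 s := by
  simp [PySem.Chars.replace]
  exact pvGoPair_eq s.length s [] le_rfl

theorem pvRepl2_len_le (l : List Char) : (pvRepl2 l).length ≤ l.length := by
  induction l using pvRepl2.induct with
  | case1 => simp [pvRepl2]
  | case2 c => simp [pvRepl2]
  | case3 a b t h ih => simp [pvRepl2, h]; omega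
  | case4 a b t h ih => have := ih; simp [pvRepl2, h] at this ⊢; omega

theorem pvRepl2_len_lt (l : List Char) (h : ['-', '-'] <:+: l) :
    (pvRepl2 l).length < l.length := by
  induction l using pvRepl2.induct with
  | case1 => simp at h
  | case2 c =>
    exfalso
    have := h.length_le
    simp at this
  | case3 a b t hab ih =>
    have := pvRepl2_len_le t
    simp [pvRepl2, hab]
    omega
  | case4 a b t hab ih =>
    have hbt : ['-', '-'] <:+: (b :: t) := by
      rcases h with ⟨l1, l2, he⟩
      match l1, he with
      | [], he => exact absurd ⟨(List.cons.injEq .. ▸ he).1.symm, by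
          simp at he; exact he.2.1.symm⟩ hab
      | x :: l1', he =>
        simp only [List.cons_append, List.cons.injEq] at he
        exact ⟨l1', l2, he.2⟩
    have := ih hbt
    simp [pvRepl2, hab] at this ⊢
    omega

-- A's `while "--" in anchor: anchor = anchor.replace("--", "-")`
def pvWhileCollapse (s : String) : String :=
  if PySem.Str.isIn "--" s then pvWhileCollapse (PySem.Str.replace s "--" "-") else s
termination_by s.toList.length
decreasing_by
  rename_i h
  have hinf : ("--".toList) <:+: s.toList := (PySem.Str.isIn_iff_infix _ _).mp h
  have he : (PySem.Str.replace s "--" "-").toList = pvRepl2 s.toList := by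
    rw [PySem.Str.toList_replace]; exact pvReplacePair_eq s.toList
  rw [he]
  exact pvRepl2_len_lt s.toList hinf

def create_anchor_link_py (agent_name : String) : String :=
  let anchor := PySem.Str.lower agent_name
  let anchor := PySem.Str.replace anchor " " "-"
  let anchor := PySem.Str.replace anchor "(" ""
  let anchor := PySem.Str.replace anchor ")" ""
  let anchor := PySem.Str.replace anchor "&" ""
  let anchor := PySem.Str.replace anchor "," ""
  let anchor := PySem.Str.replace anchor "." ""
  let anchor := PySem.Str.replace anchor "'" ""
  let anchor := PySem.Str.replace anchor "\"" ""
  let anchor := pvWhileCollapse anchor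
  PySem.Str.stripChars anchor "-"

-- ===== PORT B =====
def pvRemove : List Char := ['(', ')', '&', ',', '.', '\'', '"']

-- one loop iteration of Source B ('c in "()&,.\'\""' on a single char is membership in those chars)
def pvStepB (out : List Char) (c : Char) : List Char :=
  if pvRemove.contains c then out
  else if c = ' ' ∨ c = '-' then (if out.getLast? = some '-' then out else out ++ ['-'])
  else out ++ [c]

def create_anchor_link_py_alt (agent_name : String) : String :=
  let out := (PySem.Str.lower agent_name).toList.foldl pvStepB []
  PySem.Str.stripChars (String.ofList out) "-"

-- ===== PRECONDITION & SPEC =====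
def Spec_create_anchor_link_py (agent_name : String) (out : String) : Prop := out = create_anchor_link_py_alt agent_name
instance (agent_name : String) (out : String) : Decidable (Spec_create_anchor_link_py agent_name out) := by unfold Spec_create_anchor_link_py; infer_instance

-- ===== CLAIM (what is proved, stated in full; the proofs are below) =====
def Claim_equal_create_anchor_link_py : Prop := ∀ (agent_name : String), Dom_create_anchor_link_py agent_name → Spec_create_anchor_link_py agent_name (create_anchor_link_py agent_name)

-- ===== LEMMAS AND PROOFS =====

def pvKeep (c : Char) : Bool := !pvRemove.contains c
def pvG (c : Char) : Char := if c = ' ' then '-' else c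

-- hyphen-run collapse as a one-flag state machine (flag = last emitted char was '-')
def pvCollapse1 : Bool → List Char → List Char
  | _, [] => []
  | b, c :: t => if c = '-' then (if b then pvCollapse1 true t else '-' :: pvCollapse1 true t)
                 else c :: pvCollapse1 false t

theorem pvCollapse1_repl2 (l : List Char) : ∀ fl, pvCollapse1 fl (pvRepl2 l) = pvCollapse1 fl l := by
  induction l using pvRepl2.induct with
  | case1 => intro fl; simp [pvRepl2]
  | case2 c => intro fl; simp [pvRepl2]
  | case3 a b t hab ih =>
    intro fl
    obtain ⟨ha, hb⟩ := hab
    subst ha; subst hb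
    cases fl <;> simp [pvRepl2, pvCollapse1, ih]
  | case4 a b t hab ih =>
    intro fl
    rw [pvRepl2, if_neg hab]
    cases fl <;> by_cases ha : a = '-' <;> simp [pvCollapse1, ha, ih]

theorem pvCollapse1_id (l : List Char) : ∀ fl, ¬ ['-', '-'] <:+: l →
    (fl = true → l.head? ≠ some '-') → pvCollapse1 fl l = l := by
  induction l with
  | nil => intro fl _ _; simp [pvCollapse1]
  | cons c t ih =>
    intro fl hinf hhd
    have htinf : ¬ ['-', '-'] <:+: t := fun h => hinf (h.trans (List.suffix_cons c t).isInfix)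
    by_cases hc : c = '-'
    · subst hc
      have hfl : fl = false := by
        cases fl
        · rfl
        · exact absurd rfl (hhd rfl)
      subst hfl
      have hthd : t.head? ≠ some '-' := by
        intro hh
        cases t with
        | nil => simp at hh
        | cons x t' =>
          simp at hh
          subst hh
          exact hinf ⟨[], t', by simp⟩
      simp [pvCollapse1, ih true htinf (fun _ => hthd)]
    · simp [pvCollapse1, hc, ih false htinf (by simp)]

theorem pvFoldB (l : List Char) : ∀ out, l.foldl pvStepB out =
    out ++ pvCollapse1 (out.getLast? == some '-') ((l.filter pvKeep).map pvG) := by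
  induction l with
  | nil => intro out; simp [pvCollapse1]
  | cons c t ih =>
    intro out
    rw [List.foldl_cons, ih]
    by_cases hrm : c ∈ pvRemove
    · simp [pvStepB, hrm, pvKeep]
    · have hk : pvKeep c = true := by simp [pvKeep, hrm]
      by_cases hsp : c = ' ' ∨ c = '-'
      · have hg : pvG c = '-' := by rcases hsp with h | h <;> subst h <;> simp [pvG]
        by_cases hl : out.getLast? = some '-'
        · simp [pvStepB, hrm, hsp, hl, hk, hg, pvCollapse1]
        · simp [pvStepB, hrm, hsp, hl, hk, hg, pvCollapse1]
      · have hg : pvG c = c := by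
          simp [pvG]; intro h; exact absurd (Or.inl h) hsp
        have hc : ¬ c = '-' := fun h => hsp (Or.inr h)
        have hs1 : ¬ c = ' ' := fun h => hsp (Or.inl h)
        simp [pvStepB, hrm, hs1, hk, hg, hc, pvCollapse1]
        rw [show (c == '-') = false from beq_eq_false_iff_ne.mpr hc]

theorem pvGoSingle_eq (a : Char) (new : List Char) (fuel : Nat) :
    ∀ (l acc : List Char), l.length ≤ fuel →
    PySem.Chars.replace.go [a] new fuel l acc =
      acc.reverse ++ l.flatMap (fun c => if c = a then new else [c]) := by
  induction fuel with
  | zero =>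
    intro l acc h
    have : l = [] := List.eq_nil_of_length_eq_zero (Nat.le_zero.mp h)
    subst this
    simp [PySem.Chars.replace.go]
  | succ n ih =>
    intro l acc h
    match l with
    | [] => simp [PySem.Chars.replace.go]
    | c :: t =>
      simp only [List.length_cons] at h
      simp [PySem.Chars.replace.go, List.isPrefixOf]
      by_cases hc : c = a
      · rw [if_pos hc.symm, ih t (new.reverse ++ acc) (by omega)]
        simp [hc]
      · rw [if_neg (fun hx => hc hx.symm), ih t (c :: acc) (by omega)]
        simp [hc]

theorem pvReplaceSingle (s : List Char) (a : Char) (new : List Char) :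
    PySem.Chars.replace s [a] new = s.flatMap (fun c => if c = a then new else [c]) := by
  simp [PySem.Chars.replace]
  exact pvGoSingle_eq a new s.length s [] le_rfl

theorem pvReplaceMap (s : List Char) (a b : Char) :
    PySem.Chars.replace s [a] [b] = s.map (fun c => if c = a then b else c) := by
  rw [pvReplaceSingle]
  induction s with
  | nil => simp
  | cons c t ih => by_cases hc : c = a <;> simp [hc, ih]

theorem pvReplaceDel (s : List Char) (a : Char) :
    PySem.Chars.replace s [a] [] = s.filter (fun c => !(c == a)) := by
  rw [pvReplaceSingle]
  induction s with
  | nil => simp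
  | cons c t ih => by_cases hc : c = a <;> simp [hc, ih]

theorem pvWhile_eq (s : String) : (pvWhileCollapse s).toList = pvCollapse1 false s.toList := by
  induction s using pvWhileCollapse.induct with
  | case1 s h ih =>
    rw [pvWhileCollapse, if_pos h, ih, PySem.Str.toList_replace]
    have h2 : "--".toList = ['-', '-'] := rfl
    have h1 : "-".toList = ['-'] := rfl
    rw [h2, h1, pvReplacePair_eq, pvCollapse1_repl2]
  | case2 s h =>
    rw [pvWhileCollapse, if_neg h]
    have hinf : ¬ ['-', '-'] <:+: s.toList := by
      intro hi
      exact h ((PySem.Str.isIn_iff_infix "--" s).mpr hi)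
    exact (pvCollapse1_id s.toList false hinf (by simp)).symm

theorem pvChainA (L : List Char) :
    List.filter (fun c => !(c == '"'))
      (List.filter (fun c => !(c == '\''))
        (List.filter (fun c => !(c == '.'))
          (List.filter (fun c => !(c == ','))
            (List.filter (fun c => !(c == '&'))
              (List.filter (fun c => !(c == ')'))
                (List.filter (fun c => !(c == '('))
                  (List.map (fun c => if c = ' ' then '-' else c) L))))))) =
    List.map pvG (List.filter pvKeep L) := by
  simp only [List.filter_filter, List.filter_map]
  congr 1
  refine List.filter_congr (fun c _ => ?_)
  by_cases hsp : c = ' '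
  · subst hsp
    simp [pvKeep, pvRemove]
  · have hb : ∀ a : Char, (c == a) = decide (c = a) := fun a => rfl
    simp only [Function.comp, if_neg hsp, pvKeep, pvRemove, List.contains_cons,
      List.contains_nil, Bool.or_false, Bool.not_or, hb]
    ac_rfl

-- ===== VERDICT (by name: the statement is the Claim_ definition above) =====
theorem create_anchor_link_py_spec : Claim_equal_create_anchor_link_py := by
  intro s _
  unfold Spec_create_anchor_link_py
  unfold create_anchor_link_py create_anchor_link_py_alt
  refine congrArg (fun l => PySem.Str.stripChars l "-") ?_
  have hB : ((PySem.Str.lower s).toList.foldl pvStepB []) =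
      pvCollapse1 false (List.map pvG (List.filter pvKeep (PySem.Chars.lower s.toList))) := by
    rw [pvFoldB, PySem.Str.toList_lower]
    simp
  have hA : (pvWhileCollapse (PySem.Str.replace (PySem.Str.replace (PySem.Str.replace
      (PySem.Str.replace (PySem.Str.replace (PySem.Str.replace (PySem.Str.replace
      (PySem.Str.replace (PySem.Str.lower s) " " "-") "(" "") ")" "") "&" "") "," "")
      "." "") "'" "") "\"" "")).toList =
      pvCollapse1 false (List.map pvG (List.filter pvKeep (PySem.Chars.lower s.toList))) := by
    rw [pvWhile_eq]
    simp only [PySem.Str.toList_replace, PySem.Str.toList_lower]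
    rw [show (" ".toList) = [' '] from rfl, show ("-".toList) = ['-'] from rfl,
      show ("(".toList) = ['('] from rfl, show (")".toList) = [')'] from rfl,
      show ("&".toList) = ['&'] from rfl, show (",".toList) = [','] from rfl,
      show (".".toList) = ['.'] from rfl, show ("'".toList) = ['\''] from rfl,
      show ("\"".toList) = ['"'] from rfl, show ("".toList) = ([] : List Char) from rfl]
    rw [pvReplaceMap]
    rw [pvReplaceDel, pvReplaceDel, pvReplaceDel, pvReplaceDel, pvReplaceDel,
      pvReplaceDel, pvReplaceDel]
    rw [pvChainA]
  calc pvWhileCollapse _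
      = String.ofList (pvWhileCollapse _).toList := String.ofList_toList.symm
    _ = String.ofList ((PySem.Str.lower s).toList.foldl pvStepB []) := by rw [hA, ← hB]
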